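-- pv_equiv track=rewrite | github.com/humphrit7/m269 | tma01_3b.py | least_common_in_sorted
-- ===== SOURCE A (Python) =====
-- def least_common_in_sorted(numbers):
--     """
--     Finds the least common number in an unsorted list of
--     integers. If there is more than one number with the
--     same frequency, returns the rare number which
--     appears last in the list .
--
--     Inputs
--     ------
--     numbers - list - contains only integers
--
--     Returns
--     -------
--     integer - the least common, or joint least common
--               integer in the list.
--     """
--     leastCommon = numbers[0]
--     currentCount = 0
--     currentNumber = numbers[0]
--     lowestCount = len(numbers)
--     for i in range(len(numbers)):
--         if numbers[i] == currentNumber: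
--             currentCount += 1
--         else:
--             if currentCount <= lowestCount:
--                 lowestCount = currentCount
--                 leastCommon = currentNumber
--             currentNumber = numbers[i]
--             currentCount = 1
--     if currentCount <= lowestCount:
--         leastCommon = currentNumber
--     return leastCommon
-- ===== SOURCE B (Python) =====
-- def least_common_in_sorted(numbers):
--     # Two-phase: first compress the list into (value, run-length) pairs,
--     # then select the last run with minimal length.
--     runs = []
--     for x in numbers:
--         if runs and runs[-1][0] == x:
--             runs[-1][1] += 1
--         else:
--             runs.append([x, 1])
--     least = numbers[0]
--     lowest = len(numbers)
--     for value, count in runs: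
--         if count <= lowest:
--             least, lowest = value, count
--     return least
-- ===== Notes on version B (the rewrite author's own statement) =====
-- stated objective: alternative
-- what changed: B replaces A's single-pass four-variable state machine by a two-phase run-length-encode (value,count) pass followed by a separate last-minimal-run selection pass.
import Mathlib
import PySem

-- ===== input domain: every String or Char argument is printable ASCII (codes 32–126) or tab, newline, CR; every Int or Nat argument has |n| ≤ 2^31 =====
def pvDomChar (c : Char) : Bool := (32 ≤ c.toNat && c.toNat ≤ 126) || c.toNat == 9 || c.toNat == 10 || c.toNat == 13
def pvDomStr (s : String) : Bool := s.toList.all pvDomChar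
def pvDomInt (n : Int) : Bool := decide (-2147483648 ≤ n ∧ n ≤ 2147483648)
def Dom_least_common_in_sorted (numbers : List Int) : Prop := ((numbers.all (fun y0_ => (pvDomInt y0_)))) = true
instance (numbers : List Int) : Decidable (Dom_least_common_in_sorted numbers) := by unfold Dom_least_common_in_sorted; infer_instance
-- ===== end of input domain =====

-- B replaces A's single-pass four-variable state machine by a two-phase run-length encoding
-- followed by a last-minimal-run selection pass (alternative decomposition, same O(n) cost).
-- A and B both raise IndexError on the empty list (numbers[0]); Pre_ excludes it.


-- ===== PORT A =====
-- loop body of A: state = (leastCommon, currentCount, currentNumber, lowestCount), element numbers[i]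
def aStep (s : Int × Int × Int × Int) (x : Int) : Int × Int × Int × Int :=
  let (lc, cc, cn, lo) := s
  if x = cn then (lc, cc + 1, cn, lo)
  else if cc ≤ lo then (cn, 1, x, cc)
  else (lc, 1, x, lo)

def least_common_in_sorted (numbers : List Int) : Int :=
  let leastCommon := (PySem.List.pyGet? numbers 0).getD 0   -- numbers[0]; none (IndexError) excluded by Pre_
  let currentNumber := (PySem.List.pyGet? numbers 0).getD 0
  let st := (PySem.List.pyRange 0 (PySem.List.len numbers) 1).foldl
      (fun s i => aStep s (PySem.List.pyGetD numbers i 0))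
      (leastCommon, 0, currentNumber, (numbers.length : Int))
  if st.2.1 ≤ st.2.2.2 then st.2.2.1 else st.1

-- ===== PORT B =====
-- run-length-encoding step of Source B's first loop
def runStep (runs : List (Int × Int)) (x : Int) : List (Int × Int) :=
  match runs.getLast? with
  | some (v, c) => if v = x then runs.dropLast ++ [(v, c + 1)] else runs ++ [(x, 1)]
  | none => [(x, 1)]

-- selection step of Source B's second loop: state = (least, lowest)
def selStep (s : Int × Int) (vc : Int × Int) : Int × Int :=
  if vc.2 ≤ s.2 then vc else s

def least_common_in_sorted_alt (numbers : List Int) : Int :=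
  let runs := numbers.foldl runStep []
  let least := (PySem.List.pyGet? numbers 0).getD 0   -- numbers[0]
  (runs.foldl selStep (least, (numbers.length : Int))).1

-- ===== PRECONDITION & SPEC =====
-- A raises IndexError on the empty list (numbers[0]); B raises there too.
def Pre_least_common_in_sorted (numbers : List Int) : Prop := numbers ≠ []
instance (numbers : List Int) : Decidable (Pre_least_common_in_sorted numbers) := by
  unfold Pre_least_common_in_sorted; infer_instance

def pvWitness_least_common_in_sorted : List Int := [1, 2, 2]

def Spec_least_common_in_sorted (numbers : List Int) (out : Int) : Prop := out = least_common_in_sorted_alt numbers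
instance (numbers : List Int) (out : Int) : Decidable (Spec_least_common_in_sorted numbers out) := by unfold Spec_least_common_in_sorted; infer_instance

-- ===== CLAIM (what is proved, stated in full; the proofs are below) =====
def Claim_equal_least_common_in_sorted : Prop := ∀ (numbers : List Int), Dom_least_common_in_sorted numbers → Pre_least_common_in_sorted numbers → Spec_least_common_in_sorted numbers (least_common_in_sorted numbers)

-- ===== LEMMAS AND PROOFS =====

theorem runStep_concat (rs : List (Int × Int)) (v c x : Int) :
    runStep (rs ++ [(v, c)]) x =
      if v = x then rs ++ [(v, c + 1)] else (rs ++ [(v, c)]) ++ [(x, 1)] := by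
  simp [runStep]

-- Main invariant: A's element-wise fold, started in the state corresponding to runs
-- rs ++ [(v,c)] already seen, computes the same answer as selecting over the extended runs.
theorem main_inv (l : List Int) : ∀ (rs : List (Int × Int)) (v c : Int) (init : Int × Int),
    (let st := l.foldl aStep ((rs.foldl selStep init).1, c, v, (rs.foldl selStep init).2)
     if st.2.1 ≤ st.2.2.2 then st.2.2.1 else st.1)
    = ((l.foldl runStep (rs ++ [(v, c)])).foldl selStep init).1 := by
  induction l with
  | nil =>
    intro rs v c init
    simp only [List.foldl_nil, List.foldl_append, List.foldl_cons]
    by_cases h : c ≤ (rs.foldl selStep init).2 <;> simp [selStep, h]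
  | cons x l ih =>
    intro rs v c init
    simp only [List.foldl_cons, runStep_concat]
    by_cases hx : v = x
    · -- same run continues
      have : aStep ((rs.foldl selStep init).1, c, v, (rs.foldl selStep init).2) x
          = ((rs.foldl selStep init).1, c + 1, v, (rs.foldl selStep init).2) := by
        simp [aStep, hx.symm]
      rw [this, ih rs v (c + 1) init]
      simp [hx]
    · -- new run begins
      have hsel : (rs ++ [(v, c)]).foldl selStep init = selStep (rs.foldl selStep init) (v, c) := by
        simp [List.foldl_append]
      have : aStep ((rs.foldl selStep init).1, c, v, (rs.foldl selStep init).2) x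
          = (((rs ++ [(v, c)]).foldl selStep init).1, 1, x, ((rs ++ [(v, c)]).foldl selStep init).2) := by
        rw [hsel]
        have hx' : ¬ x = v := fun h' => hx h'.symm
        by_cases h : c ≤ (rs.foldl selStep init).2 <;>
          simp [aStep, selStep, h, hx']
      rw [this, ih (rs ++ [(v, c)]) x 1 init]
      simp [hx]

-- ===== VERDICT (by name: the statement is the Claim_ definition above) =====
theorem least_common_in_sorted_spec : Claim_equal_least_common_in_sorted := by
  intro numbers _ hpre
  unfold Spec_least_common_in_sorted least_common_in_sorted least_common_in_sorted_alt
  match numbers, hpre with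
  | h :: t, _ =>
    simp only [PySem.List.pyGet?_zero_cons, Option.getD_some]
    rw [PySem.List.foldl_pyRange_zero_pyGetD (h :: t) 0
        (fun s x => aStep s x) _]
    simp only [List.foldl_cons]
    have hstep : aStep ((h:Int), 0, h, ((h :: t).length : Int)) h
        = (h, 1, h, ((h :: t).length : Int)) := by simp [aStep]
    have hrun : runStep [] h = [(h, 1)] := by simp [runStep]
    have := main_inv t [] h 1 ((h : Int), ((h :: t).length : Int))
    simp only [List.foldl_nil, List.nil_append] at this
    simp only [hstep, hrun]
    exact this
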